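-- pv_equiv track=rewrite | github.com/camargodev/programming-challenges | uri/1110/1110.py | throw_card
-- ===== SOURCE A (Python) =====
-- def throw_card(n):
--     ls = [i+1 for i in range(n)]
--     retls = []
--     while len(ls) > 1:
--         sz = len(ls)
--         odd_ls = ls[::2]
--         retls += odd_ls
--         ls = ls[1::2]
--         if sz % 2 != 0:
--             first = ls[0]
--             ls = ls[1:sz] + [first]
--
--     return retls, ls[0]
-- ===== SOURCE B (Python) =====
-- def throw_card(n):
--     # Per-card FIFO simulation: repeatedly discard the top card, then move the
--     # next card to the bottom.  The queue is a list with a moving head index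
--     # (appends at the tail), so there is no per-level slicing at all.
--     q = list(range(1, n + 1))
--     out = []
--     head = 0
--     while len(q) - head > 1:
--         out.append(q[head])
--         head += 1
--         q.append(q[head])
--         head += 1
--     return out, q[head]
-- ===== Notes on version B (the rewrite author's own statement) =====
-- stated objective: alternative
-- what changed: Replaced A's level-by-level stride-2 slicing with its odd/even rotation special case by a direct per-card FIFO simulation (discard top, move next to bottom) on a head-indexed queue.
import Mathlib
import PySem

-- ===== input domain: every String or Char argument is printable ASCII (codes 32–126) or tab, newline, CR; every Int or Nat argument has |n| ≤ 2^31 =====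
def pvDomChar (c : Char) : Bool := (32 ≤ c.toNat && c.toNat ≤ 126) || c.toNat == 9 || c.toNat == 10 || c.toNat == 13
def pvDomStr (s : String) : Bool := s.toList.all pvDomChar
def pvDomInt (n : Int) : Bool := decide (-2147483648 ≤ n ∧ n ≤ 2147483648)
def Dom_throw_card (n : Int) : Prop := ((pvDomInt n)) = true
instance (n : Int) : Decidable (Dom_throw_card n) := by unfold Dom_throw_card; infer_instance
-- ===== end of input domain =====

-- B replaces A's level-by-level stride-2 slicing (with its odd/even rotation case) by a
-- direct per-card FIFO simulation on a head-indexed queue; same cost, different algorithm.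


-- ===== PORT A =====

/-- Hand port of the full stride-2 slice `xs[::2]` (no bounds, positive step 2):
the elements at indices 0, 2, 4, …; exact for every list. -/
def everyOther : List Int → List Int
  | [] => []
  | [x] => [x]
  | x :: _ :: rest => x :: everyOther rest

theorem everyOther_length : ∀ (l : List Int), (everyOther l).length = (l.length + 1) / 2
  | [] => by simp [everyOther]
  | [_] => by simp [everyOther]
  | _ :: _ :: rest => by
    show (everyOther rest).length + 1 = (rest.length + 1 + 2) / 2
    rw [everyOther_length rest, Nat.add_div_right _ Nat.zero_lt_two]

/-- The body of `aloop`'s loop shrinks the deck: its termination certificate. -/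
theorem aloop_dec (ls : List Int) (w : Int) (h : 1 < ls.length) :
    (if ((ls.length : Int)) % 2 ≠ 0 then
        PySem.List.slice (everyOther (ls.drop 1)) (some 1) (some ((ls.length : Int))) ++ [w]
      else everyOther (ls.drop 1)).length < ls.length := by
  have hL : 1 ≤ ls.length := Nat.le_of_lt h
  have h2 : (everyOther (ls.drop 1)).length = ls.length / 2 := by
    rw [everyOther_length, List.length_drop, Nat.sub_add_cancel hL]
  have hdiv : ls.length / 2 < ls.length :=
    Nat.div_lt_self (Nat.lt_of_lt_of_le Nat.zero_lt_one hL) Nat.one_lt_two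
  by_cases hif : ((ls.length : Int)) % 2 ≠ 0
  · rw [if_pos hif, List.length_append,
      PySem.List.slice_toNat (ha := zero_le_one) (hb := Int.natCast_nonneg _),
      List.length_take, List.length_drop, Int.toNat_natCast, Int.toNat_one]
    show min (ls.length - 1) ((everyOther (ls.drop 1)).length - 1) + 1 < ls.length
    rcases Nat.eq_zero_or_pos (everyOther (ls.drop 1)).length with he | he
    · rw [he]
      exact Nat.lt_of_le_of_lt
        (Nat.succ_le_succ (Nat.le_trans (Nat.min_le_right _ _) (Nat.zero_le _))) h
    · exact Nat.lt_of_le_of_lt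
        (Nat.le_trans (Nat.succ_le_succ (Nat.min_le_right _ _))
          (Nat.le_of_eq (Nat.sub_add_cancel he)))
        (h2 ▸ hdiv)
  · rw [if_neg hif, h2]
    exact hdiv

/-- A's while-loop; `ls[0]` on an empty list (Python IndexError) is `none`,
defaulted to 0 — those inputs are excluded by `Pre_throw_card`. -/
def aloop (ls : List Int) (retls : List Int) : List Int × Int :=
  if _h : 1 < ls.length then
    let sz : Int := ls.length
    let odd_ls := everyOther ls                       -- ls[::2]
    let retls2 := retls ++ odd_ls
    let ls2 := everyOther (ls.drop 1)                  -- ls[1::2]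
    let ls3 := if sz % 2 ≠ 0 then
        (PySem.List.slice ls2 (some 1) (some sz)) ++ [(PySem.List.pyGet? ls2 0).getD 0]
      else ls2
    aloop ls3 retls2
  else (retls, (PySem.List.pyGet? ls 0).getD 0)
  termination_by ls.length
  decreasing_by exact aloop_dec ls _ _h

def throw_card (n : Int) : List Int × Int :=
  aloop ((PySem.List.pyRange 0 n 1).map (fun i => i + 1)) []

-- ===== PORT B =====

/-- The loop advances `head` by 2 while appending 1: its termination certificate. -/
theorem bloop_dec (q : List Int) (v : Int) (head : Nat) (h : head + 1 < q.length) :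
    (q ++ [v]).length - (head + 2) < q.length - head := by
  rw [List.length_append]
  show q.length + 1 - (head + 1 + 1) < q.length - head
  rw [Nat.succ_sub_succ, ← Nat.sub_sub]
  exact Nat.sub_lt (Nat.sub_pos_of_lt (Nat.lt_of_succ_lt h)) Nat.one_pos

/-- B's while-loop: `q` is the queue's backing list, `head` the index of its front.
`q[head]` after the loop is `none` exactly when Python raises IndexError (n ≤ 0),
defaulted to 0 — excluded by `Pre_throw_card`. -/
def bloop (q : List Int) (head : Nat) (out : List Int) : List Int × Int :=
  if h : head + 1 < q.length then
    let out2 := out ++ [q.getD head 0]                 -- out.append(q[head]); head += 1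
    let q2 := q ++ [q.getD (head + 1) 0]               -- q.append(q[head]); head += 1
    bloop q2 (head + 2) out2
  else (out, (PySem.List.pyGet? q (head : Int)).getD 0)
  termination_by q.length - head
  decreasing_by exact bloop_dec q _ head h

def throw_card_alt (n : Int) : List Int × Int :=
  bloop (PySem.List.pyRange 1 (n + 1) 1) 0 []

-- ===== PRECONDITION & SPEC =====
-- Pre_ excludes n ≤ 0, on which both A and B raise IndexError (empty deck, `ls[0]`/`q[head]`).
def Pre_throw_card (n : Int) : Prop := 1 ≤ n
instance (n : Int) : Decidable (Pre_throw_card n) := by unfold Pre_throw_card; infer_instance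
def pvWitness_throw_card : Int := 5

def Spec_throw_card (n : Int) (out : List Int × Int) : Prop := out = throw_card_alt n
instance (n : Int) (out : List Int × Int) : Decidable (Spec_throw_card n out) := by unfold Spec_throw_card; infer_instance

-- ===== CLAIM (what is proved, stated in full; the proofs are below) =====
def Claim_equal_throw_card : Prop := ∀ (n : Int), Dom_throw_card n → Pre_throw_card n → Spec_throw_card n (throw_card n)

-- ===== LEMMAS AND PROOFS =====

/-- Clean queue form of B's loop: discard the front, move the next to the back. -/
def bsim : List Int → List Int → List Int × Int
  | x :: y :: rest, out => bsim (rest ++ [y]) (out ++ [x])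
  | dq, out => (out, (PySem.List.pyGet? dq 0).getD 0)
  termination_by dq _ => dq.length
  decreasing_by simp

theorem everyOther_cons (x : Int) (xs : List Int) :
    everyOther (x :: xs) = x :: everyOther (xs.drop 1) := by
  cases xs <;> simp [everyOther]

theorem everyOther_append_even (l : List Int) (z : Int) (h : l.length % 2 = 0) :
    everyOther (l ++ [z]) = everyOther l ++ [z] := by
  induction l using everyOther.induct with
  | case1 => simp [everyOther]
  | case2 => simp at h
  | case3 x y rest ih =>
    simp at h
    simp [everyOther]; exact ih (by omega)

theorem everyOther_append_odd (l : List Int) (z : Int) (h : l.length % 2 = 1) :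
    everyOther (l ++ [z]) = everyOther l := by
  induction l using everyOther.induct with
  | case1 => simp at h
  | case2 => simp [everyOther]
  | case3 x y rest ih =>
    simp at h
    simp [everyOther]; exact ih (by omega)

theorem bsim_even (k : Nat) : ∀ (l t out : List Int), l.length = 2 * k →
    bsim (l ++ t) out = bsim (t ++ everyOther (l.drop 1)) (out ++ everyOther l) := by
  induction k with
  | zero =>
    intro l t out hl
    have : l = [] := List.eq_nil_of_length_eq_zero (by omega)
    subst this; simp [everyOther]
  | succ k ih =>
    intro l t out hl
    match l with
    | a :: b :: l' =>
      simp at hl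
      have step : bsim ((a :: b :: l') ++ t) out = bsim (l' ++ (t ++ [b])) (out ++ [a]) := by
        simp [bsim]
      rw [step, ih l' (t ++ [b]) (out ++ [a]) (by omega)]
      simp only [List.drop_succ_cons, List.drop_zero, everyOther_cons b l',
        everyOther_cons a (b :: l')]
      simp

/-- One level of A's slicing equals the corresponding run of B's per-card steps. -/
theorem level (ls out : List Int) (h : 1 < ls.length) :
    bsim ls out =
      bsim (if ((ls.length : Int)) % 2 ≠ 0 then
              (PySem.List.slice (everyOther (ls.drop 1)) (some 1) (some (ls.length : Int)))
                ++ [(PySem.List.pyGet? (everyOther (ls.drop 1)) 0).getD 0]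
            else everyOther (ls.drop 1))
        (out ++ everyOther ls) := by
  by_cases hpar : ls.length % 2 = 0
  · have hif : ¬ (((ls.length : Int)) % 2 ≠ 0) := by omega
    rw [if_neg hif]
    obtain ⟨k, hk⟩ : ∃ k, ls.length = 2 * k := ⟨ls.length / 2, by omega⟩
    have := bsim_even k ls [] out hk
    simpa using this
  · -- odd length ≥ 3
    have hif : (((ls.length : Int)) % 2 ≠ 0) := by omega
    rw [if_pos hif]
    have hne : ls ≠ [] := by intro hnil; simp [hnil] at h
    have hdec : ls = ls.dropLast ++ [ls.getLast hne] := (List.dropLast_append_getLast hne).symm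
    set l0 := ls.dropLast with hl0
    set z := ls.getLast hne with hz
    have hlen0 : l0.length = ls.length - 1 := by simp [hl0]
    obtain ⟨k, hk⟩ : ∃ k, l0.length = 2 * k := ⟨l0.length / 2, by omega⟩
    have hkpos : 1 ≤ k := by omega
    -- the eo's
    have heo_ls : everyOther ls = everyOther l0 ++ [z] := by
      conv_lhs => rw [hdec]
      exact everyOther_append_even l0 z (by omega)
    have hdrop : ls.drop 1 = l0.drop 1 ++ [z] := by
      conv_lhs => rw [hdec]
      rw [List.drop_append_of_le_length (by omega)]
    have heo_drop : everyOther (ls.drop 1) = everyOther (l0.drop 1) := by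
      rw [hdrop]
      exact everyOther_append_odd _ z (by simp; omega)
    have hmlen : (everyOther (l0.drop 1)).length = k := by
      rw [everyOther_length]; simp; omega
    obtain ⟨w, r, hm⟩ : ∃ w r, everyOther (l0.drop 1) = w :: r := by
      cases hv : everyOther (l0.drop 1) with
      | nil => rw [hv] at hmlen; simp at hmlen; omega
      | cons w r => exact ⟨w, r, rfl⟩
    have hrlen : r.length = k - 1 := by rw [hm] at hmlen; simp at hmlen; omega
    -- B side: run the even prefix, then one more step
    have h1 : bsim ls out = bsim ([z] ++ everyOther (l0.drop 1)) (out ++ everyOther l0) := by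
      conv_lhs => rw [hdec]
      exact bsim_even k l0 [z] out hk
    rw [h1, hm]
    have h2 : bsim ([z] ++ w :: r) (out ++ everyOther l0) =
        bsim (r ++ [w]) ((out ++ everyOther l0) ++ [z]) := by simp [bsim]
    rw [h2]
    -- A side: rotation = r ++ [w]
    have hslice : PySem.List.slice (everyOther (ls.drop 1)) (some 1) (some (ls.length : Int))
        = r := by
      rw [heo_drop, hm]
      rw [PySem.List.slice_toNat]
      · simp
        omega
      · omega
      · omega
    have hget : (PySem.List.pyGet? (everyOther (ls.drop 1)) 0).getD 0 = w := by
      rw [heo_drop, hm, PySem.List.pyGet?_zero_cons]; rfl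
    rw [hslice, hget, heo_ls]
    simp

theorem aloop_eq_bsim (ls out : List Int) : aloop ls out = bsim ls out := by
  fun_induction aloop ls out with
  | case1 ls out h sz odd_ls retls2 ls2 ls3 ih =>
    rw [ih]
    have hlv := level ls out h
    simp only [sz, odd_ls, retls2, ls2, ls3, dite_eq_ite] at *
    rw [← hlv]
  | case2 ls out h =>
    match ls with
    | [] => simp [bsim]
    | [x] => simp [bsim]
    | x :: y :: rest => exfalso; simp at h

theorem bloop_eq_bsim (q : List Int) (head : Nat) (out : List Int) (h : head ≤ q.length) :
    bloop q head out = bsim (q.drop head) out := by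
  fun_induction bloop q head out with
  | case1 q head out hlt out2 q2 ih =>
    have hx : q.drop head = q.getD head 0 :: q.getD (head + 1) 0 :: q.drop (head + 2) := by
      have e1 : q.getD head 0 = q[head] := List.getD_eq_getElem q 0 (by omega)
      have e2 : q.getD (head + 1) 0 = q[head + 1] := List.getD_eq_getElem q 0 hlt
      rw [e1, e2]
      rw [List.drop_eq_getElem_cons (by omega)]
      rw [List.drop_eq_getElem_cons (i := head + 1) hlt]
    have hq2 : q2.drop (head + 2) = q.drop (head + 2) ++ [q.getD (head + 1) 0] := by
      simp only [q2]
      rw [List.drop_append_of_le_length (by omega)]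
    rw [ih (by simp [q2]; omega), hq2, hx]
    simp [bsim, out2]
  | case2 q head out hge =>
    have hx : (PySem.List.pyGet? q (head : Int)).getD 0
        = (PySem.List.pyGet? (q.drop head) 0).getD 0 := by
      rw [PySem.List.pyGet?_natCast, PySem.List.pyGet?_zero]
      rw [List.getElem?_drop]
      norm_num
    rw [hx]
    match hd : q.drop head with
    | [] => simp [bsim]
    | [x] => simp [bsim]
    | x :: y :: rest =>
      exfalso
      have hle : (q.drop head).length ≤ 1 := by simp; omega
      rw [hd] at hle; simp at hle

theorem start_eq (n : Int) :
    (PySem.List.pyRange 0 n 1).map (fun i => i + 1) = PySem.List.pyRange 1 (n + 1) 1 := by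
  rw [PySem.List.pyRange_one, PySem.List.pyRange_one, List.map_map]
  simp
  intro a _
  omega

-- ===== VERDICT (by name: the statement is the Claim_ definition above) =====
theorem throw_card_spec : Claim_equal_throw_card := by
  intro n _ _
  unfold Spec_throw_card throw_card throw_card_alt
  rw [aloop_eq_bsim, bloop_eq_bsim _ _ _ (by omega), List.drop_zero, start_eq]
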